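-- pv_equiv track=rewrite | github.com/CodelineAtyab/genz-todo-list-app | examples/sara_work_area/Package_Measurement/conversion.py | get_merged_list
-- ===== SOURCE A (Python) =====
-- def get_merged_list(input_string):
--     merged_list = []
--     merged_value = 0
--     for digit in input_string:
--         if digit == 26:
--             merged_value += 26
--         else:
--             merged_list.append(digit + merged_value)
--             merged_value = 0
--     return merged_list
-- ===== SOURCE B (Python) =====
-- def get_merged_list(input_string):
--     groups = []
--     current = []
--     for x in input_string:
--         current.append(x)
--         if x != 26:
--             groups.append(current)
--             current = []
--     return [sum(g) for g in groups]
-- ===== Notes on version B (the rewrite author's own statement) =====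
-- stated objective: alternative
-- what changed: B first partitions the input into groups (runs of 26s terminated by a non-26, a trailing unterminated run discarded) and then sums each group in a second pass, instead of threading a running scalar and emitting in one loop.
import Mathlib
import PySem

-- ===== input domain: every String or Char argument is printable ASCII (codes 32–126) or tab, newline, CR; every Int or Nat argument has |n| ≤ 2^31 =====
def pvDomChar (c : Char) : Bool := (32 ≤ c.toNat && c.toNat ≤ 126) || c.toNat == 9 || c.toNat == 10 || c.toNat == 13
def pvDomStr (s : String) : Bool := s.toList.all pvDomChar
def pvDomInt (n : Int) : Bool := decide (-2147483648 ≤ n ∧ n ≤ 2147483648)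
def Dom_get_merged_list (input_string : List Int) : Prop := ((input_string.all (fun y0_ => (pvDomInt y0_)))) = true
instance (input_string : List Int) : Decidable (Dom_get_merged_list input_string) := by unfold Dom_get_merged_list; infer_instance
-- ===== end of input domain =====

-- B groups the input (each run of 26s closed by its following non-26 element) and sums each group
-- in a second pass, instead of A's single loop threading a running scalar; same O(n) cost.

-- ===== PORT A =====
def get_merged_list (input_string : List Int) : List Int :=
  (input_string.foldl
    (fun (s : List Int × Int) digit =>
      if digit == 26 then (s.1, s.2 + 26)
      else (s.1 ++ [digit + s.2], 0))
    ([], 0)).1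

-- ===== PORT B =====
def get_merged_list_alt (input_string : List Int) : List Int :=
  let s := input_string.foldl
    (fun (s : List (List Int) × List Int) x =>
      let current := s.2 ++ [x]
      if x != 26 then (s.1 ++ [current], [])
      else (s.1, current))
    ([], [])
  s.1.map List.sum

-- ===== PRECONDITION & SPEC =====
def Spec_get_merged_list (input_string : List Int) (out : List Int) : Prop := out = get_merged_list_alt input_string
instance (input_string : List Int) (out : List Int) : Decidable (Spec_get_merged_list input_string out) := by unfold Spec_get_merged_list; infer_instance

-- ===== CLAIM (what is proved, stated in full; the proofs are below) =====
def Claim_equal_get_merged_list : Prop := ∀ (input_string : List Int), Dom_get_merged_list input_string → Spec_get_merged_list input_string (get_merged_list input_string)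

-- ===== LEMMAS AND PROOFS =====

theorem merged_invariant (xs : List Int) (ml : List Int) (mv : Int)
    (groups : List (List Int)) (cur : List Int)
    (h1 : ml = groups.map List.sum) (h2 : mv = cur.sum) :
    (xs.foldl
      (fun (s : List Int × Int) digit =>
        if digit == 26 then (s.1, s.2 + 26)
        else (s.1 ++ [digit + s.2], 0)) (ml, mv)).1
    = ((xs.foldl
      (fun (s : List (List Int) × List Int) x =>
        let current := s.2 ++ [x]
        if x != 26 then (s.1 ++ [current], [])
        else (s.1, current)) (groups, cur)).1).map List.sum := by
  induction xs generalizing ml mv groups cur with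
  | nil => simpa using h1
  | cons d t ih =>
    simp only [List.foldl_cons]
    by_cases hd : d = 26
    · subst hd
      rw [if_pos (by decide), if_neg (by decide)]
      exact ih _ _ _ _ h1 (by simp [h2])
    · rw [if_neg (by simpa using hd), if_pos (by simpa using hd)]
      exact ih _ _ _ _ (by simp [h1, h2]; ring) rfl

-- ===== VERDICT (by name: the statement is the Claim_ definition above) =====
theorem get_merged_list_spec : Claim_equal_get_merged_list := by
  intro xs _
  unfold Spec_get_merged_list get_merged_list get_merged_list_alt
  exact merged_invariant xs [] 0 [] [] rfl rfl
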